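-- pv_equiv track=rewrite | github.com/Serfetto/RU-RPG-Companion-App | scripts/dndsu_character_stats_translator.py | abbreviation_for_stat
-- ===== SOURCE A (Python) =====
-- from typing import Iterable, List, Optional
--
-- ABILITY_ABBRS = {
--     "strength": "Сил",
--     "dexterity": "Лов",
--     "constitution": "Тел",
--     "intelligence": "Инт",
--     "wisdom": "Мдр",
--     "charisma": "Хар",
-- }
--
-- FIXED_ABBREVIATIONS = {
--     "level": "Ур.",
--     "armor_class": "КД",
--     "passive_perception": "ПВ",
--     "initiative": "Иниц.",
--     "proficiency_bonus": "БМ",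
-- }
--
-- def abbreviation_for_stat(stat_id: str) -> Optional[str]:
--     if stat_id in FIXED_ABBREVIATIONS:
--         return FIXED_ABBREVIATIONS[stat_id]
--
--     for ability_key, translated in ABILITY_ABBRS.items():
--         if stat_id in {
--             f"{ability_key}_score",
--             f"{ability_key}_modifier",
--             f"{ability_key}_saving_throw",
--             f"{ability_key}_saving_throw_proficiency",
--         }:
--             return translated
--
--     return None
-- ===== SOURCE B (Python) =====
-- from typing import Optional
--
-- ABILITY_ABBRS = {
--     "strength": "Сил",
--     "dexterity": "Лов",
--     "constitution": "Тел",
--     "intelligence": "Инт",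
--     "wisdom": "Мдр",
--     "charisma": "Хар",
-- }
--
-- FIXED_ABBREVIATIONS = {
--     "level": "Ур.",
--     "armor_class": "КД",
--     "passive_perception": "ПВ",
--     "initiative": "Иниц.",
--     "proficiency_bonus": "БМ",
-- }
--
-- _SUFFIXES = ("_saving_throw_proficiency", "_saving_throw", "_modifier", "_score")
--
-- def abbreviation_for_stat(stat_id: str) -> Optional[str]:
--     fixed = FIXED_ABBREVIATIONS.get(stat_id)
--     if fixed is not None:
--         return fixed
--     for suffix in _SUFFIXES:
--         if stat_id.endswith(suffix):
--             return ABILITY_ABBRS.get(stat_id[:-len(suffix)])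
--     return None
-- ===== Notes on version B (the rewrite author's own statement) =====
-- stated objective: simpler
-- what changed: A builds a 4-element candidate set per ability and scans all six abilities; B parses the id instead: fixed lookup, then strip the first matching suffix from a fixed 4-tuple and look the remaining prefix up in ABILITY_ABBRS.
import Mathlib
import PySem

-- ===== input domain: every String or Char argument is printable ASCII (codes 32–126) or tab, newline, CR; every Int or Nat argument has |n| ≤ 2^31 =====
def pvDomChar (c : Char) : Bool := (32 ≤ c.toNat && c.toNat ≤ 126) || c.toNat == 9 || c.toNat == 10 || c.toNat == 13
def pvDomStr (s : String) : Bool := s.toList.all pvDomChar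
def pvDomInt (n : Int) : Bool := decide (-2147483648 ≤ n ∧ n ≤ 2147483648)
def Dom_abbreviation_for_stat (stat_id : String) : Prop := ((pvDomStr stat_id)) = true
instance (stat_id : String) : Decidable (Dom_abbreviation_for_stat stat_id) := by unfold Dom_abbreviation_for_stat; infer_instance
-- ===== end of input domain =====

-- B replaces A's per-ability candidate-set loop by suffix parsing (strip a matching suffix, look the
-- prefix up in ABILITY_ABBRS); objective: simpler, same return value on every input.

-- ===== PORT A =====
def pvFixedAbbrs : PySem.Dict String String := PySem.Dict.ofList [("level","Ур."),("armor_class","КД"),("passive_perception","ПВ"),("initiative","Иниц."),("proficiency_bonus","БМ")]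
def pvAbilityAbbrs : PySem.Dict String String := PySem.Dict.ofList [("strength","Сил"),("dexterity","Лов"),("constitution","Тел"),("intelligence","Инт"),("wisdom","Мдр"),("charisma","Хар")]

-- the 'for ability_key, translated in ABILITY_ABBRS.items()' loop with early return
def pvALoop (stat_id : String) : List (String × String) → Option String
  | [] => none
  | (k, t) :: rest =>
    if (PySem.Set.ofList [PySem.Str.join "" [k, "_score"], PySem.Str.join "" [k, "_modifier"],
        PySem.Str.join "" [k, "_saving_throw"], PySem.Str.join "" [k, "_saving_throw_proficiency"]]).contains stat_id
    then some t else pvALoop stat_id rest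

def abbreviation_for_stat (stat_id : String) : Option String :=
  if pvFixedAbbrs.contains stat_id then pvFixedAbbrs.get? stat_id
  else pvALoop stat_id pvAbilityAbbrs.items

-- ===== PORT B =====
def pvSuffixes : List String := ["_saving_throw_proficiency", "_saving_throw", "_modifier", "_score"]

-- the 'for suffix in _SUFFIXES' loop: on the first matching suffix, strip it and look up the prefix
def pvBLoop (stat_id : String) : List String → Option String
  | [] => none
  | suf :: rest =>
    if PySem.Str.endswith stat_id suf then
      pvAbilityAbbrs.get? (PySem.Str.slice stat_id none (some (-(PySem.Str.len suf))))
    else pvBLoop stat_id rest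

def abbreviation_for_stat_alt (stat_id : String) : Option String :=
  match pvFixedAbbrs.get? stat_id with
  | some v => some v
  | none => pvBLoop stat_id pvSuffixes

-- ===== PRECONDITION & SPEC =====
def Spec_abbreviation_for_stat (stat_id : String) (out : Option String) : Prop := out = abbreviation_for_stat_alt stat_id
instance (stat_id : String) (out : Option String) : Decidable (Spec_abbreviation_for_stat stat_id out) := by unfold Spec_abbreviation_for_stat; infer_instance

-- ===== CLAIM (what is proved, stated in full; the proofs are below) =====
def Claim_equal_abbreviation_for_stat : Prop := ∀ (stat_id : String), Dom_abbreviation_for_stat stat_id → Spec_abbreviation_for_stat stat_id (abbreviation_for_stat stat_id)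

-- ===== LEMMAS AND PROOFS =====

-- the 29 stat ids on which either program can return a value
def pvK : List String := ["level", "armor_class", "passive_perception", "initiative", "proficiency_bonus", "strength_score", "strength_modifier", "strength_saving_throw", "strength_saving_throw_proficiency", "dexterity_score", "dexterity_modifier", "dexterity_saving_throw", "dexterity_saving_throw_proficiency", "constitution_score", "constitution_modifier", "constitution_saving_throw", "constitution_saving_throw_proficiency", "intelligence_score", "intelligence_modifier", "intelligence_saving_throw", "intelligence_saving_throw_proficiency", "wisdom_score", "wisdom_modifier", "wisdom_saving_throw", "wisdom_saving_throw_proficiency", "charisma_score", "charisma_modifier", "charisma_saving_throw", "charisma_saving_throw_proficiency"]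

lemma pvFixed_mk : pvFixedAbbrs = PySem.Dict.mk [("level","Ур."),("armor_class","КД"),("passive_perception","ПВ"),("initiative","Иниц."),("proficiency_bonus","БМ")] := by rfl
lemma pvAbil_mk : pvAbilityAbbrs = PySem.Dict.mk [("strength","Сил"),("dexterity","Лов"),("constitution","Тел"),("intelligence","Инт"),("wisdom","Мдр"),("charisma","Хар")] := by rfl

lemma pvJoin1 : PySem.Str.join "" ["strength", "_score"] = "strength_score" := by rfl
lemma pvJoin2 : PySem.Str.join "" ["strength", "_modifier"] = "strength_modifier" := by rfl
lemma pvJoin3 : PySem.Str.join "" ["strength", "_saving_throw"] = "strength_saving_throw" := by rfl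
lemma pvJoin4 : PySem.Str.join "" ["strength", "_saving_throw_proficiency"] = "strength_saving_throw_proficiency" := by rfl
lemma pvJoin5 : PySem.Str.join "" ["dexterity", "_score"] = "dexterity_score" := by rfl
lemma pvJoin6 : PySem.Str.join "" ["dexterity", "_modifier"] = "dexterity_modifier" := by rfl
lemma pvJoin7 : PySem.Str.join "" ["dexterity", "_saving_throw"] = "dexterity_saving_throw" := by rfl
lemma pvJoin8 : PySem.Str.join "" ["dexterity", "_saving_throw_proficiency"] = "dexterity_saving_throw_proficiency" := by rfl
lemma pvJoin9 : PySem.Str.join "" ["constitution", "_score"] = "constitution_score" := by rfl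
lemma pvJoin10 : PySem.Str.join "" ["constitution", "_modifier"] = "constitution_modifier" := by rfl
lemma pvJoin11 : PySem.Str.join "" ["constitution", "_saving_throw"] = "constitution_saving_throw" := by rfl
lemma pvJoin12 : PySem.Str.join "" ["constitution", "_saving_throw_proficiency"] = "constitution_saving_throw_proficiency" := by rfl
lemma pvJoin13 : PySem.Str.join "" ["intelligence", "_score"] = "intelligence_score" := by rfl
lemma pvJoin14 : PySem.Str.join "" ["intelligence", "_modifier"] = "intelligence_modifier" := by rfl
lemma pvJoin15 : PySem.Str.join "" ["intelligence", "_saving_throw"] = "intelligence_saving_throw" := by rfl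
lemma pvJoin16 : PySem.Str.join "" ["intelligence", "_saving_throw_proficiency"] = "intelligence_saving_throw_proficiency" := by rfl
lemma pvJoin17 : PySem.Str.join "" ["wisdom", "_score"] = "wisdom_score" := by rfl
lemma pvJoin18 : PySem.Str.join "" ["wisdom", "_modifier"] = "wisdom_modifier" := by rfl
lemma pvJoin19 : PySem.Str.join "" ["wisdom", "_saving_throw"] = "wisdom_saving_throw" := by rfl
lemma pvJoin20 : PySem.Str.join "" ["wisdom", "_saving_throw_proficiency"] = "wisdom_saving_throw_proficiency" := by rfl
lemma pvJoin21 : PySem.Str.join "" ["charisma", "_score"] = "charisma_score" := by rfl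
lemma pvJoin22 : PySem.Str.join "" ["charisma", "_modifier"] = "charisma_modifier" := by rfl
lemma pvJoin23 : PySem.Str.join "" ["charisma", "_saving_throw"] = "charisma_saving_throw" := by rfl
lemma pvJoin24 : PySem.Str.join "" ["charisma", "_saving_throw_proficiency"] = "charisma_saving_throw_proficiency" := by rfl

-- on a known id both programs return the same (fully concrete) value
lemma pvKnown : ∀ s ∈ pvK, abbreviation_for_stat s = abbreviation_for_stat_alt s := by decide

-- suffix stripping: if s ends with suf, the slice s[:-len(suf)] is exactly s with suf removed
lemma pvStrip (s suf p : String) (k : Nat) (hk : suf.toList.length = k) (hlen : 0 < k)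
    (h : PySem.Str.endswith s suf = true)
    (h2 : PySem.Str.slice s none (some (-(PySem.Str.len suf))) = p) :
    s.toList = p.toList ++ suf.toList := by
  rw [PySem.Str.endswith_eq] at h
  obtain ⟨t, ht⟩ := (PySem.Chars.endswith_iff _ _).mp h
  have hsl : (PySem.Str.slice s none (some (-(PySem.Str.len suf)))).toList
      = s.toList.take (s.toList.length - k) := by
    rw [PySem.Str.toList_slice]
    have hlen' : PySem.Str.len suf = (k : Int) := by
      simp [PySem.Str.len_eq, ← hk]
    rw [hlen']
    simpa using PySem.List.slice_to_neg_natCast (xs := s.toList) (k := k) hlen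
  rw [h2] at hsl
  have hta : s.toList.take (s.toList.length - k) = t := by
    rw [← ht]; simp [← hk]
  rw [hsl, hta, ht]

-- if s ends with suf but s ≠ ab ++ suf, then the stripped prefix is not ab
lemma pvNotPref (s suf ab full : String) (k : Nat) (hk : suf.toList.length = k) (hlen : 0 < k)
    (hfull : ab.toList ++ suf.toList = full.toList) (hne : ¬ s = full)
    (h : PySem.Str.endswith s suf = true) :
    ¬ (ab = PySem.Str.slice s none (some (-(PySem.Str.len suf)))) := by
  intro heq
  have h3 := pvStrip s suf _ k hk hlen h rfl
  rw [← heq, hfull] at h3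
  apply hne
  have h4 := congrArg String.ofList h3
  simpa using h4

-- B's ability lookup after stripping suf misses when stat_id is none of the six full ids for suf
lemma pvBGet (stat_id suf f0 f1 f2 f3 f4 f5 : String) (k : Nat)
    (hk : suf.toList.length = k) (hlen : 0 < k)
    (hE : PySem.Str.endswith stat_id suf = true)
    (hf0 : ("strength" : String).toList ++ suf.toList = f0.toList)
    (hf1 : ("dexterity" : String).toList ++ suf.toList = f1.toList)
    (hf2 : ("constitution" : String).toList ++ suf.toList = f2.toList)
    (hf3 : ("intelligence" : String).toList ++ suf.toList = f3.toList)
    (hf4 : ("wisdom" : String).toList ++ suf.toList = f4.toList)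
    (hf5 : ("charisma" : String).toList ++ suf.toList = f5.toList)
    (hn0 : ¬ stat_id = f0) (hn1 : ¬ stat_id = f1) (hn2 : ¬ stat_id = f2)
    (hn3 : ¬ stat_id = f3) (hn4 : ¬ stat_id = f4) (hn5 : ¬ stat_id = f5) :
    pvAbilityAbbrs.get? (PySem.Str.slice stat_id none (some (-(PySem.Str.len suf)))) = none := by
  have n0 := pvNotPref stat_id suf "strength" f0 k hk hlen hf0 hn0 hE
  have n1 := pvNotPref stat_id suf "dexterity" f1 k hk hlen hf1 hn1 hE
  have n2 := pvNotPref stat_id suf "constitution" f2 k hk hlen hf2 hn2 hE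
  have n3 := pvNotPref stat_id suf "intelligence" f3 k hk hlen hf3 hn3 hE
  have n4 := pvNotPref stat_id suf "wisdom" f4 k hk hlen hf4 hn4 hE
  have n5 := pvNotPref stat_id suf "charisma" f5 k hk hlen hf5 hn5 hE
  simp only [pysem, String.length_toList] at n0 n1 n2 n3 n4 n5
  simp [pvAbil_mk, PySem.Dict.get?_mk_cons, PySem.Dict.get?, n0, n1, n2, n3, n4, n5]

lemma pvA_unknown (stat_id : String)
    (h0 : ¬ stat_id = "level")
    (h1 : ¬ stat_id = "armor_class")
    (h2 : ¬ stat_id = "passive_perception")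
    (h3 : ¬ stat_id = "initiative")
    (h4 : ¬ stat_id = "proficiency_bonus")
    (h5 : ¬ stat_id = "strength_score")
    (h6 : ¬ stat_id = "strength_modifier")
    (h7 : ¬ stat_id = "strength_saving_throw")
    (h8 : ¬ stat_id = "strength_saving_throw_proficiency")
    (h9 : ¬ stat_id = "dexterity_score")
    (h10 : ¬ stat_id = "dexterity_modifier")
    (h11 : ¬ stat_id = "dexterity_saving_throw")
    (h12 : ¬ stat_id = "dexterity_saving_throw_proficiency")
    (h13 : ¬ stat_id = "constitution_score")
    (h14 : ¬ stat_id = "constitution_modifier")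
    (h15 : ¬ stat_id = "constitution_saving_throw")
    (h16 : ¬ stat_id = "constitution_saving_throw_proficiency")
    (h17 : ¬ stat_id = "intelligence_score")
    (h18 : ¬ stat_id = "intelligence_modifier")
    (h19 : ¬ stat_id = "intelligence_saving_throw")
    (h20 : ¬ stat_id = "intelligence_saving_throw_proficiency")
    (h21 : ¬ stat_id = "wisdom_score")
    (h22 : ¬ stat_id = "wisdom_modifier")
    (h23 : ¬ stat_id = "wisdom_saving_throw")
    (h24 : ¬ stat_id = "wisdom_saving_throw_proficiency")
    (h25 : ¬ stat_id = "charisma_score")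
    (h26 : ¬ stat_id = "charisma_modifier")
    (h27 : ¬ stat_id = "charisma_saving_throw")
    (h28 : ¬ stat_id = "charisma_saving_throw_proficiency") :
    abbreviation_for_stat stat_id = none := by
  simp [abbreviation_for_stat, pvFixed_mk, PySem.Dict.contains_mk, pvAbil_mk,
        pvALoop, PySem.Set.contains, PySem.Set.ofList, pvJoin1, pvJoin2, pvJoin3, pvJoin4, pvJoin5, pvJoin6, pvJoin7, pvJoin8, pvJoin9, pvJoin10, pvJoin11, pvJoin12, pvJoin13, pvJoin14, pvJoin15, pvJoin16, pvJoin17, pvJoin18, pvJoin19, pvJoin20, pvJoin21, pvJoin22, pvJoin23, pvJoin24,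
        Ne.symm h0, Ne.symm h1, Ne.symm h2, Ne.symm h3, Ne.symm h4, Ne.symm h5, Ne.symm h6, Ne.symm h7, Ne.symm h8, Ne.symm h9, Ne.symm h10, Ne.symm h11, Ne.symm h12, Ne.symm h13, Ne.symm h14, Ne.symm h15, Ne.symm h16, Ne.symm h17, Ne.symm h18, Ne.symm h19, Ne.symm h20, Ne.symm h21, Ne.symm h22, Ne.symm h23, Ne.symm h24, Ne.symm h25, Ne.symm h26, Ne.symm h27, Ne.symm h28, h0, h1, h2, h3, h4, h5, h6, h7, h8, h9, h10, h11, h12, h13, h14, h15, h16, h17, h18, h19, h20, h21, h22, h23, h24, h25, h26, h27, h28]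

lemma pvB_unknown (stat_id : String)
    (h0 : ¬ stat_id = "level")
    (h1 : ¬ stat_id = "armor_class")
    (h2 : ¬ stat_id = "passive_perception")
    (h3 : ¬ stat_id = "initiative")
    (h4 : ¬ stat_id = "proficiency_bonus")
    (h5 : ¬ stat_id = "strength_score")
    (h6 : ¬ stat_id = "strength_modifier")
    (h7 : ¬ stat_id = "strength_saving_throw")
    (h8 : ¬ stat_id = "strength_saving_throw_proficiency")
    (h9 : ¬ stat_id = "dexterity_score")
    (h10 : ¬ stat_id = "dexterity_modifier")
    (h11 : ¬ stat_id = "dexterity_saving_throw")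
    (h12 : ¬ stat_id = "dexterity_saving_throw_proficiency")
    (h13 : ¬ stat_id = "constitution_score")
    (h14 : ¬ stat_id = "constitution_modifier")
    (h15 : ¬ stat_id = "constitution_saving_throw")
    (h16 : ¬ stat_id = "constitution_saving_throw_proficiency")
    (h17 : ¬ stat_id = "intelligence_score")
    (h18 : ¬ stat_id = "intelligence_modifier")
    (h19 : ¬ stat_id = "intelligence_saving_throw")
    (h20 : ¬ stat_id = "intelligence_saving_throw_proficiency")
    (h21 : ¬ stat_id = "wisdom_score")
    (h22 : ¬ stat_id = "wisdom_modifier")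
    (h23 : ¬ stat_id = "wisdom_saving_throw")
    (h24 : ¬ stat_id = "wisdom_saving_throw_proficiency")
    (h25 : ¬ stat_id = "charisma_score")
    (h26 : ¬ stat_id = "charisma_modifier")
    (h27 : ¬ stat_id = "charisma_saving_throw")
    (h28 : ¬ stat_id = "charisma_saving_throw_proficiency") :
    abbreviation_for_stat_alt stat_id = none := by
  have hfix : pvFixedAbbrs.get? stat_id = none := by
    simp [pvFixed_mk, PySem.Dict.get?_mk_cons, PySem.Dict.get?, Ne.symm h0, Ne.symm h1, Ne.symm h2, Ne.symm h3, Ne.symm h4]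
  rw [abbreviation_for_stat_alt, hfix]
  simp only [pvSuffixes, pvBLoop]
  by_cases hE0 : PySem.Str.endswith stat_id "_saving_throw_proficiency" = true
  · rw [if_pos hE0]
    exact pvBGet stat_id "_saving_throw_proficiency" "strength_saving_throw_proficiency" "dexterity_saving_throw_proficiency" "constitution_saving_throw_proficiency" "intelligence_saving_throw_proficiency" "wisdom_saving_throw_proficiency" "charisma_saving_throw_proficiency" 25 (by decide) (by decide) hE0 (by decide) (by decide) (by decide) (by decide) (by decide) (by decide) h8 h12 h16 h20 h24 h28
  · simp only [Bool.not_eq_true] at hE0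
    rw [hE0, if_neg Bool.false_ne_true]
    by_cases hE1 : PySem.Str.endswith stat_id "_saving_throw" = true
    · rw [if_pos hE1]
      exact pvBGet stat_id "_saving_throw" "strength_saving_throw" "dexterity_saving_throw" "constitution_saving_throw" "intelligence_saving_throw" "wisdom_saving_throw" "charisma_saving_throw" 13 (by decide) (by decide) hE1 (by decide) (by decide) (by decide) (by decide) (by decide) (by decide) h7 h11 h15 h19 h23 h27
    · simp only [Bool.not_eq_true] at hE1
      rw [hE1, if_neg Bool.false_ne_true]
      by_cases hE2 : PySem.Str.endswith stat_id "_modifier" = true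
      · rw [if_pos hE2]
        exact pvBGet stat_id "_modifier" "strength_modifier" "dexterity_modifier" "constitution_modifier" "intelligence_modifier" "wisdom_modifier" "charisma_modifier" 9 (by decide) (by decide) hE2 (by decide) (by decide) (by decide) (by decide) (by decide) (by decide) h6 h10 h14 h18 h22 h26
      · simp only [Bool.not_eq_true] at hE2
        rw [hE2, if_neg Bool.false_ne_true]
        by_cases hE3 : PySem.Str.endswith stat_id "_score" = true
        · rw [if_pos hE3]
          exact pvBGet stat_id "_score" "strength_score" "dexterity_score" "constitution_score" "intelligence_score" "wisdom_score" "charisma_score" 6 (by decide) (by decide) hE3 (by decide) (by decide) (by decide) (by decide) (by decide) (by decide) h5 h9 h13 h17 h21 h25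
        · simp only [Bool.not_eq_true] at hE3
          rw [hE3, if_neg Bool.false_ne_true]

-- ===== VERDICT (by name: the statement is the Claim_ definition above) =====
theorem abbreviation_for_stat_spec : Claim_equal_abbreviation_for_stat := by
  intro stat_id _
  unfold Spec_abbreviation_for_stat
  by_cases hK : stat_id ∈ pvK
  · exact pvKnown stat_id hK
  · simp only [pvK, List.mem_cons, List.not_mem_nil, or_false] at hK
    push_neg at hK
    obtain ⟨h0, h1, h2, h3, h4, h5, h6, h7, h8, h9, h10, h11, h12, h13, h14, h15, h16, h17, h18, h19, h20, h21, h22, h23, h24, h25, h26, h27, h28⟩ := hK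
    rw [pvA_unknown stat_id h0 h1 h2 h3 h4 h5 h6 h7 h8 h9 h10 h11 h12 h13 h14 h15 h16 h17 h18 h19 h20 h21 h22 h23 h24 h25 h26 h27 h28,
        pvB_unknown stat_id h0 h1 h2 h3 h4 h5 h6 h7 h8 h9 h10 h11 h12 h13 h14 h15 h16 h17 h18 h19 h20 h21 h22 h23 h24 h25 h26 h27 h28]
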